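-- pv_equiv track=rewrite | github.com/lvy010/AI-exploration | AI_image/1Prompt1Story/story_generator.py | circular_sliding_windows
-- ===== SOURCE A (Python) =====
-- from typing import List, Tuple, Optional
--
-- def circular_sliding_windows(lst: List, w: int) -> List[List]:
--     """
--     循环滑动窗口生成
--
--     Args:
--         lst: 输入列表
--         w: 窗口大小
--
--     Returns:
--         滑动窗口列表
--     """
--     n = len(lst)
--     if n == 0:
--         return []
--
--     windows = []
--     for i in range(n):
--         window = []
--         for j in range(w):
--             window.append(lst[(i + j) % n])
--         windows.append(window)
--
--     return windows
-- ===== SOURCE B (Python) =====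
-- def circular_sliding_windows(lst, w):
--     """Circular sliding windows via one precomputed repeated list and slicing."""
--     n = len(lst)
--     if n == 0:
--         return []
--     k = max(w, 0)
--     ext = lst * (k // n + 2)
--     return [ext[i:i + k] for i in range(n)]
-- ===== Notes on version B (the rewrite author's own statement) =====
-- stated objective: simpler
-- what changed: Replaces the nested per-element modulo-indexing loop by building one repeated list lst * (k//n + 2) and taking each window as a plain slice ext[i:i+k].
import Mathlib
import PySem

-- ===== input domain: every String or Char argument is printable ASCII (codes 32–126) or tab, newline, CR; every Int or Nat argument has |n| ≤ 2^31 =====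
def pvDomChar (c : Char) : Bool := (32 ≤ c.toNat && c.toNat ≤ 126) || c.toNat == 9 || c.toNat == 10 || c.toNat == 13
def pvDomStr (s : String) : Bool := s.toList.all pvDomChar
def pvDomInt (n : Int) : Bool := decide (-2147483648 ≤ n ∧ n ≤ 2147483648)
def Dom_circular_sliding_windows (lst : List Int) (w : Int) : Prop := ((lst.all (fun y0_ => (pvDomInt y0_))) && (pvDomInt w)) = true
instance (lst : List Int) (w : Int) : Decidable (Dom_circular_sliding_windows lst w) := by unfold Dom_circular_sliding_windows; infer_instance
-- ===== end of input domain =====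

-- B replaces the inner modulo-indexing loop by one precomputed repeated list sliced per window (return value equivalence; neither mutates).


-- ===== PORT A =====
-- lst[(i+j) % n] is always in range (n > 0, Python mod nonneg for n > 0), so pyGetD's default 0 is never used
def circular_sliding_windows (lst : List Int) (w : Int) : List (List Int) :=
  let n := lst.length
  if n = 0 then []
  else
    (PySem.List.pyRange 0 (n : Int) 1).foldl (fun windows i =>
      windows ++ [(PySem.List.pyRange 0 w 1).foldl (fun window j =>
        window ++ [PySem.List.pyGetD lst (PySem.Int.mod (i + j) (n : Int)) 0]) []]) []

-- ===== PORT B =====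
-- ext = lst * (k // n + 2); windows are slices ext[i : i+k]
def circular_sliding_windows_alt (lst : List Int) (w : Int) : List (List Int) :=
  let n := lst.length
  if n = 0 then []
  else
    let k := max w 0
    let ext := (List.replicate (PySem.Int.floordiv k (n : Int) + 2).toNat lst).flatten
    (PySem.List.pyRange 0 (n : Int) 1).map (fun i => PySem.List.slice ext (some i) (some (i + k)))

-- ===== PRECONDITION & SPEC =====
def Spec_circular_sliding_windows (lst : List Int) (w : Int) (out : List (List Int)) : Prop := out = circular_sliding_windows_alt lst w
instance (lst : List Int) (w : Int) (out : List (List Int)) : Decidable (Spec_circular_sliding_windows lst w out) := by unfold Spec_circular_sliding_windows; infer_instance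

-- ===== CLAIM (what is proved, stated in full; the proofs are below) =====
def Claim_equal_circular_sliding_windows : Prop := ∀ (lst : List Int) (w : Int), Dom_circular_sliding_windows lst w → Spec_circular_sliding_windows lst w (circular_sliding_windows lst w)

-- ===== LEMMAS AND PROOFS =====

-- indexing into the repeated list is modular indexing into lst
lemma flatten_replicate_getElem? (lst : List Int) (c m : Nat) (h : m < c * lst.length) :
    ((List.replicate c lst).flatten)[m]? = lst[m % lst.length]? := by
  induction c generalizing m with
  | zero => simp at h
  | succ c ih =>
    rw [Nat.succ_mul] at h
    have hn : 0 < lst.length := by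
      rcases Nat.eq_zero_or_pos lst.length with h0 | h0
      · simp [h0] at h
      · exact h0
    rw [List.replicate_succ, List.flatten_cons]
    by_cases hm : m < lst.length
    · rw [List.getElem?_append_left hm, Nat.mod_eq_of_lt hm]
    · rw [not_lt] at hm
      have hrec := ih (m - lst.length) (by omega)
      rw [List.getElem?_append_right hm, hrec, Nat.mod_eq_sub_mod hm]

-- one window: the slice of the repeated list equals A's inner modular loop
lemma window_eq (lst : List Int) (w : Int) (i : Nat) (hi : i < lst.length) :
    PySem.List.slice ((List.replicate (PySem.Int.floordiv (max w 0) (lst.length : Int) + 2).toNat lst).flatten)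
        (some (i : Int)) (some ((i : Int) + max w 0))
      = (List.range w.toNat).map
          (fun j => PySem.List.pyGetD lst (PySem.Int.mod ((i : Int) + (j : Nat)) (lst.length : Int)) 0) := by
  have hn : 0 < lst.length := by omega
  set n : Nat := lst.length with hnd
  have hnI : (0 : Int) < (n : Int) := by exact_mod_cast hn
  clear_value n
  set k : Int := max w 0 with hk
  have hk0 : 0 ≤ k := le_max_right _ _
  have hkc : k = w ∨ k = 0 := by rw [hk]; exact max_choice w 0
  have hkw : w ≤ k := by rw [hk]; exact le_max_left w 0
  have hwk : (w.toNat : Int) = k := by rcases hkc with h | h <;> omega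
  clear_value k
  set c : Nat := (PySem.Int.floordiv k (n : Int) + 2).toNat with hc
  have hfd : PySem.Int.floordiv k (n : Int) = k / (n : Int) :=
    PySem.Int.floordiv_eq_ediv_of_pos hnI
  have hdiv0 : (0 : Int) ≤ k / (n : Int) := Int.ediv_nonneg hk0 (by omega)
  have hcI : (c : Int) = k / (n : Int) + 2 := by
    rw [hc, hfd]; exact Int.toNat_of_nonneg (by omega)
  clear_value c
  have hdm : k / (n : Int) * (n : Int) + k % (n : Int) = k := Int.ediv_mul_add_emod k _
  have hmod : 0 ≤ k % (n : Int) := Int.emod_nonneg k (by omega)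
  have hmod2 : k % (n : Int) < (n : Int) := Int.emod_lt_of_pos k hnI
  have hcn : (c : Int) * (n : Int) = k / (n : Int) * (n : Int) + 2 * (n : Int) := by
    rw [hcI]; ring
  have hlen : i + w.toNat ≤ c * n := by
    have h1 : (i : Int) + (w.toNat : Int) ≤ (c : Int) * (n : Int) := by rw [hcn]; omega
    exact_mod_cast h1
  rw [PySem.List.slice_toNat _ (by omega) (by omega)]
  have hik : ((i : Int) + k).toNat - (i : Int).toNat = w.toNat := by omega
  rw [hik, Int.toNat_natCast]
  apply List.ext_getElem?
  intro j
  by_cases hj : j < w.toNat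
  · have hmem : PySem.Int.mod ((i : Int) + (j : Nat)) (n : Int) = (((i + j) % n : Nat) : Int) := by
      rw [PySem.Int.mod_eq_emod_of_pos hnI]
      push_cast
      rfl
    rw [List.getElem?_take, if_pos hj, List.getElem?_drop,
      flatten_replicate_getElem? lst c (i + j) (by rw [← hnd]; omega),
      List.getElem?_map, List.getElem?_range hj, Option.map_some,
      hmem, PySem.List.pyGetD_natCast]
    rw [List.getElem?_eq_getElem (by rw [← hnd]; exact Nat.mod_lt _ hn),
      List.getD_eq_getElem?_getD, List.getElem?_eq_getElem (by rw [← hnd]; exact Nat.mod_lt _ hn)]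
    simp [hnd]
  · rw [List.getElem?_take, if_neg hj]
    symm
    apply List.getElem?_eq_none
    simp only [List.length_map, List.length_range]
    omega

-- ===== VERDICT (by name: the statement is the Claim_ definition above) =====
theorem circular_sliding_windows_spec : Claim_equal_circular_sliding_windows := by
  intro lst w _
  unfold Spec_circular_sliding_windows circular_sliding_windows circular_sliding_windows_alt
  by_cases hl : lst.length = 0
  · simp [hl]
  · simp only [hl, if_false]
    rw [show ((lst.length : Int)) = ((lst.length : Nat) : Int) from rfl,
      PySem.List.pyRange_zero_nat]
    rw [List.foldl_map, List.map_map]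
    have := PySem.List.foldl_append_singleton_eq_map
      (f := fun (i : Nat) =>
        (PySem.List.pyRange 0 w 1).foldl (fun window j =>
          window ++ [PySem.List.pyGetD lst (PySem.Int.mod ((i : Int) + j) (lst.length : Int)) 0]) [])
      (l := List.range lst.length) (acc := [])
    rw [this, List.nil_append]
    apply List.map_congr_left
    intro i hi
    rw [List.mem_range] at hi
    -- A's inner loop is a map over range w.toNat, then window_eq closes the gap
    rw [Function.comp_apply, PySem.List.pyRange_one, List.foldl_map,
      PySem.List.foldl_append_singleton_eq_map, List.nil_append,
      window_eq lst w i hi]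
    simp
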